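-- pv_equiv track=rewrite | github.com/vladimirr9/programming-challenges | Codility/PassingCars.py | solution
-- ===== SOURCE A (Python) =====
-- def solution(A):
--     east = 0
--     passings = 0
--     for element in A:
--         if element == 1:
--             passings += east
--         else:
--             east += 1
--         if passings > 1000000000:
--             return -1
--     return passings
-- ===== SOURCE B (Python) =====
-- def solution(A):
--     # Two-pass: build prefix table of eastward counts, then sum it at westward cars; cap once at the end.
--     pref = []
--     east = 0
--     for x in A:
--         pref.append(east)
--         if x != 1:
--             east += 1
--     total = 0
--     for x, p in zip(A, pref):
--         if x == 1:
--             total += p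
--     return -1 if total > 1000000000 else total
-- ===== Notes on version B (the rewrite author's own statement) =====
-- stated objective: alternative
-- what changed: Replaces the single pass with an in-loop cap check by a two-pass prefix-table computation (build cumulative eastward counts, then sum them at eastward-going 1s) with the cap applied once at the end, justified by monotonicity of the running sum.
import Mathlib
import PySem

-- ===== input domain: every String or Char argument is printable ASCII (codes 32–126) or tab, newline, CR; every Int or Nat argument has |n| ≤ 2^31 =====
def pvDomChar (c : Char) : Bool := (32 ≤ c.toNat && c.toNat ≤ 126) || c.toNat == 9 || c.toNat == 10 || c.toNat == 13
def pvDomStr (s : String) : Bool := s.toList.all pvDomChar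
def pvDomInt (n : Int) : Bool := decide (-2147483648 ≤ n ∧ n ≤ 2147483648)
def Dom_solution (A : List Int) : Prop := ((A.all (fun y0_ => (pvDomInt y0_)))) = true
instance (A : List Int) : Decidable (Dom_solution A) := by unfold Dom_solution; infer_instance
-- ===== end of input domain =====

-- B replaces A's single pass with in-loop cap check by a two-pass prefix-table sum with the cap applied once at the end (alternative decomposition, same cost).

-- ===== PORT A =====
-- A's loop with early return -1 once passings exceeds the cap.
def solutionLoop : List Int → Int → Int → Int
  | [], _, passings => passings
  | x :: t, east, passings =>
    let east' := if x == 1 then east else east + 1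
    let passings' := if x == 1 then passings + east else passings
    if passings' > 1000000000 then -1 else solutionLoop t east' passings'

def solution (A : List Int) : Int := solutionLoop A 0 0

-- ===== PORT B =====
-- first pass: prefix table of eastward counts (east before each position)
def buildPref : List Int → Int → List Int
  | [], _ => []
  | x :: t, east => east :: buildPref t (if x != 1 then east + 1 else east)

-- second pass: sum the prefix counts at positions holding a 1
def sumPref : List (Int × Int) → Int → Int
  | [], total => total
  | (x, p) :: t, total => sumPref t (if x == 1 then total + p else total)

def solution_alt (A : List Int) : Int :=
  let pref := buildPref A 0
  let total := sumPref (A.zip pref) 0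
  if total > 1000000000 then -1 else total

-- ===== PRECONDITION & SPEC =====
def Spec_solution (A : List Int) (out : Int) : Prop := out = solution_alt A
instance (A : List Int) (out : Int) : Decidable (Spec_solution A out) := by unfold Spec_solution; infer_instance

-- ===== CLAIM (what is proved, stated in full; the proofs are below) =====
def Claim_equal_solution : Prop := ∀ (A : List Int), Dom_solution A → Spec_solution A (solution A)

-- ===== LEMMAS AND PROOFS =====

-- raw total of passings additions made by A's loop starting with eastward count e (no cap)
def raw : List Int → Int → Int
  | [], _ => 0
  | x :: t, e => if x == 1 then e + raw t e else raw t (e + 1)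

theorem raw_nonneg (l : List Int) (e : Int) (he : 0 ≤ e) : 0 ≤ raw l e := by
  induction l generalizing e with
  | nil => simp [raw]
  | cons x t ih =>
    simp only [raw]
    split
    · have := ih e he; omega
    · exact ih (e + 1) (by omega)

theorem solutionLoop_eq (l : List Int) (e p : Int) (he : 0 ≤ e) (hp : p ≤ 1000000000) :
    solutionLoop l e p = if p + raw l e > 1000000000 then -1 else p + raw l e := by
  induction l generalizing e p with
  | nil => simp [solutionLoop, raw]; omega
  | cons x t ih =>
    simp only [solutionLoop, raw]
    by_cases hx : x == 1
    · simp only [hx, if_true]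
      by_cases hc : p + e > 1000000000
      · have hr := raw_nonneg t e he
        rw [if_pos hc, if_pos (by omega)]
      · rw [if_neg hc, ih e (p + e) he (by omega)]
        have h2 : p + e + raw t e = p + (e + raw t e) := by ring
        rw [h2]
    · simp only [hx, Bool.false_eq_true, if_false]
      by_cases hc : p > 1000000000
      · have hr := raw_nonneg t (e + 1) (by omega)
        rw [if_pos hc, if_pos (by omega)]
      · rw [if_neg hc, ih (e + 1) p (by omega) (by omega)]

theorem sumPref_zip (l : List Int) (e acc : Int) :
    sumPref (l.zip (buildPref l e)) acc = acc + raw l e := by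
  induction l generalizing e acc with
  | nil => simp [buildPref, sumPref, raw]
  | cons x t ih =>
    simp only [buildPref, List.zip_cons_cons, sumPref, raw]
    by_cases hx : x == 1
    · have hx1 : x = 1 := by simpa using hx
      subst hx1
      simp only [ih]
      norm_num
      ring
    · have hne : (x != 1) = true := by simpa using hx
      simp only [hx, hne, Bool.false_eq_true, if_false, if_true, ih]

-- ===== VERDICT (by name: the statement is the Claim_ definition above) =====
theorem solution_spec : Claim_equal_solution := by
  intro A _
  unfold Spec_solution solution solution_alt
  rw [solutionLoop_eq A 0 0 le_rfl (by norm_num)]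
  show _ = (if sumPref (A.zip (buildPref A 0)) 0 > 1000000000 then (-1 : Int) else sumPref (A.zip (buildPref A 0)) 0)
  rw [sumPref_zip A 0 0]
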